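-- pv_equiv track=rewrite | github.com/eschondorf/advent-of-code | 2020/day14.py | list_combo
-- ===== SOURCE A (Python) =====
-- def list_combo(lst):
--     rv = []
--     if len(lst) == 0 or lst == None:
--         return []
--     else:
--         current_val = 2 ** lst[0]
--         remaining_lst = list_combo(lst[1:])
--         rv = remaining_lst[:]
--         rv.append(current_val)
--         for elt in remaining_lst:
--             rv.append(elt + current_val)
--         return rv
-- ===== SOURCE B (Python) =====
-- def list_combo(lst):
--     if len(lst) == 0 or lst == None:
--         return []
--     acc = []
--     for x in reversed(lst):
--         v = 2 ** x
--         acc = acc + [v] + [e + v for e in acc]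
--     return acc
-- ===== Notes on version B (the rewrite author's own statement) =====
-- stated objective: simpler
-- what changed: Replaces the recursion (recursive call on the tail, copy, append, append-loop) with a single iterative loop over the elements from last to first that extends one accumulator list, removing recursion and list copying.
-- outside the precondition, e.g. on list_combo([-1]): A returns [0.5], B returns [0.5]
import Mathlib
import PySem

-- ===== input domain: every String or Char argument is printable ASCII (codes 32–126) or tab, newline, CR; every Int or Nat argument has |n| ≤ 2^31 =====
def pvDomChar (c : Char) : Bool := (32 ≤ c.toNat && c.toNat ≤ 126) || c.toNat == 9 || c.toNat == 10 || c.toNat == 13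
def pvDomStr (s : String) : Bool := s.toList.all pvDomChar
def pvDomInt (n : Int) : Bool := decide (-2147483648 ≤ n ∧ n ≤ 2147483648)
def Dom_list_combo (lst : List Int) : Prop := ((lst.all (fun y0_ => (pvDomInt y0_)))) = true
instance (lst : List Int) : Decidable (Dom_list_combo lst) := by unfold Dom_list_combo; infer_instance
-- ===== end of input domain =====

-- B replaces A's recursion with one iterative loop over the elements from last to first (objective: simpler).

-- ===== PORT A =====
def list_combo (lst : List Int) : List Int :=
  match lst with
  | [] => []
  | x :: rest =>
    let current_val : Int := 2 ^ x.toNat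
    let remaining_lst := list_combo rest
    let rv := remaining_lst ++ [current_val]
    remaining_lst.foldl (fun rv elt => rv ++ [elt + current_val]) rv

-- ===== PORT B =====
def list_combo_alt (lst : List Int) : List Int :=
  lst.reverse.foldl
    (fun acc x =>
      let v : Int := 2 ^ x.toNat
      acc ++ [v] ++ acc.map (· + v)) []

-- ===== PRECONDITION & SPEC =====
-- Pre_ excludes lists containing a negative element: there Python's 2 ** x is a float,
-- so A (and B) return a list of floats, not a value of the declared list-of-int type.
def Pre_list_combo (lst : List Int) : Prop := ∀ x ∈ lst, 0 ≤ x
instance (lst : List Int) : Decidable (Pre_list_combo lst) := by unfold Pre_list_combo; infer_instance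

def pvWitness_list_combo : List Int := [3, 1, 2]

def Spec_list_combo (lst : List Int) (out : List Int) : Prop := out = list_combo_alt lst
instance (lst : List Int) (out : List Int) : Decidable (Spec_list_combo lst out) := by unfold Spec_list_combo; infer_instance

-- ===== CLAIM (what is proved, stated in full; the proofs are below) =====
def Claim_equal_list_combo : Prop := ∀ (lst : List Int), Dom_list_combo lst → Pre_list_combo lst → Spec_list_combo lst (list_combo lst)

-- ===== LEMMAS AND PROOFS =====

lemma foldl_app_map (l : List Int) (v : Int) (rv : List Int) :
    l.foldl (fun rv elt => rv ++ [elt + v]) rv = rv ++ l.map (· + v) := by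
  induction l generalizing rv with
  | nil => simp
  | cons a t ih => simp [List.foldl, ih]

lemma alt_cons (x : Int) (rest : List Int) :
    list_combo_alt (x :: rest) =
      list_combo_alt rest ++ [(2 : Int) ^ x.toNat] ++
        (list_combo_alt rest).map (· + (2 : Int) ^ x.toNat) := by
  simp [list_combo_alt, List.foldl_append]

lemma list_combo_eq_alt (lst : List Int) : list_combo lst = list_combo_alt lst := by
  induction lst with
  | nil => rfl
  | cons x rest ih =>
    simp only [list_combo, alt_cons, foldl_app_map, ih]

-- ===== VERDICT (by name: the statement is the Claim_ definition above) =====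
theorem list_combo_spec : Claim_equal_list_combo := by
  intro lst _ _
  exact list_combo_eq_alt lst
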